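-- pv_equiv track=rewrite | github.com/DakKnight03/final-course-test | simple_arr.py | simple_arr
-- ===== SOURCE A (Python) =====
-- def insertion_sort(arr):
--     '''Quick sorting algorithm for small data.'''
--     for i in range(1, len(arr)):
--         key = arr[i]
--         j = i - 1
--         while j >= 0 and key < arr[j]:
--             arr[j + 1] = arr[j]
--             j -= 1
--         arr[j + 1] = key
--     return arr
--
-- def simple_arr(array, x):
--     insertion_sort(array)
--     sumary = 0
--     counter = 0
--     for i in array:
--         sumary += i
--         if i == x:
--             counter += 1
--     biggest = array[-1]
--     smallest = array[0]
--     return "sum: %d | biggest: %d | smallest: %d | number of time x shows up: %d" % (sumary, biggest, smallest, counter)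
-- ===== SOURCE B (Python) =====
-- def _merge(left, right):
--     out = []
--     i = j = 0
--     while i < len(left) and j < len(right):
--         if left[i] <= right[j]:
--             out.append(left[i])
--             i += 1
--         else:
--             out.append(right[j])
--             j += 1
--     out.extend(left[i:])
--     out.extend(right[j:])
--     return out
--
-- def _msort(a):
--     if len(a) <= 1:
--         return list(a)
--     mid = len(a) // 2
--     return _merge(_msort(a[:mid]), _msort(a[mid:]))
--
-- def simple_arr(array, x):
--     array[:] = _msort(array)
--     return "sum: %d | biggest: %d | smallest: %d | number of time x shows up: %d" % (
--         sum(array), array[-1], array[0], array.count(x))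
-- ===== Notes on version B (the rewrite author's own statement) =====
-- stated objective: faster
-- what changed: Replaces the O(n^2) in-place insertion sort with a recursive merge sort (written back into the same list object via slice assignment) and computes the aggregates with sum()/count() and direct indexing instead of a manual accumulator loop.
import Mathlib
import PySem

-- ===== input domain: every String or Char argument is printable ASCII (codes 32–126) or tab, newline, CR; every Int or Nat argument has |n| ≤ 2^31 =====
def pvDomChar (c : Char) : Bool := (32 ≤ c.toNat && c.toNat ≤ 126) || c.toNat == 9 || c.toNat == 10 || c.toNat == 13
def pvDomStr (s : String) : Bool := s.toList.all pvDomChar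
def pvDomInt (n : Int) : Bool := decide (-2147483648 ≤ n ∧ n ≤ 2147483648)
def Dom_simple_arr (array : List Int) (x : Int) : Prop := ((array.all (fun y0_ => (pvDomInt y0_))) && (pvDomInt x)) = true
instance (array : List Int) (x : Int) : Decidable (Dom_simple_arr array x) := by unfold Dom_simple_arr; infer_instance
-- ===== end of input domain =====

-- B replaces A's O(n^2) in-place insertion sort by a recursive merge sort (slice-assigned back into
-- the same list object, so the observable mutation is the same) and aggregates with sum/count/indexing.
-- The equivalence proved here is about the return value.

-- ===== PORT A =====
-- inner while loop of insertion_sort: `while j >= 0 and key < arr[j]: arr[j+1] = arr[j]; j -= 1` then `arr[j+1] = key`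
def insInner (arr : List Int) (key : Int) (j : Int) : List Int :=
  if h : 0 ≤ j ∧ key < PySem.List.pyGetD arr j 0 then
    insInner (PySem.List.pySetD arr (j + 1) (PySem.List.pyGetD arr j 0)) key (j - 1)
  else
    PySem.List.pySetD arr (j + 1) key
  termination_by (j + 1).toNat
  decreasing_by omega

-- `for i in range(1, len(arr)): key = arr[i]; j = i - 1; <inner loop>`  (indices always in range)
def insertion_sort (arr : List Int) : List Int :=
  (PySem.List.pyRange 1 (PySem.List.len arr) 1).foldl
    (fun a i => insInner a (PySem.List.pyGetD a i 0) (i - 1)) arr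

def simple_arr (array : List Int) (x : Int) : String :=
  let arr := insertion_sort array
  let sc := arr.foldl (fun (p : Int × Int) i => (p.1 + i, if i = x then p.2 + 1 else p.2)) (0, 0)
  let biggest := PySem.List.pyGetD arr (-1) 0    -- array[-1]; in range since Pre_ says array ≠ []
  let smallest := PySem.List.pyGetD arr 0 0      -- array[0]
  "sum: " ++ PySem.Int.toStr sc.1 ++ " | biggest: " ++ PySem.Int.toStr biggest ++
    " | smallest: " ++ PySem.Int.toStr smallest ++
    " | number of time x shows up: " ++ PySem.Int.toStr sc.2

-- ===== PORT B =====
-- _merge: the two-pointer merge of Source B as the obvious structural recursion on the two lists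
def pvMerge : List Int → List Int → List Int
  | [], r => r
  | l, [] => l
  | a :: l, b :: r => if a ≤ b then a :: pvMerge l (b :: r) else b :: pvMerge (a :: l) r

-- _msort: split at len//2, sort the halves, merge
def pvMsort (a : List Int) : List Int :=
  if h : a.length ≤ 1 then a
  else
    let mid := a.length / 2
    pvMerge (pvMsort (a.take mid)) (pvMsort (a.drop mid))
  termination_by a.length
  decreasing_by
    · simp only [List.length_take]; omega
    · simp only [List.length_drop]; omega

def simple_arr_alt (array : List Int) (x : Int) : String :=
  let arr := pvMsort array
  "sum: " ++ PySem.Int.toStr arr.sum ++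
    " | biggest: " ++ PySem.Int.toStr (PySem.List.pyGetD arr (-1) 0) ++
    " | smallest: " ++ PySem.Int.toStr (PySem.List.pyGetD arr 0 0) ++
    " | number of time x shows up: " ++ PySem.Int.toStr (PySem.List.count arr x)

-- ===== PRECONDITION & SPEC =====
-- Pre_ excludes only the empty list, on which A (and B alike) raises IndexError at array[-1].
def Pre_simple_arr (array : List Int) (x : Int) : Prop := array ≠ []
instance (array : List Int) (x : Int) : Decidable (Pre_simple_arr array x) := by
  unfold Pre_simple_arr; infer_instance
def pvWitness_simple_arr : List Int × Int := ([3, 1, 2, 1], 1)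

def Spec_simple_arr (array : List Int) (x : Int) (out : String) : Prop := out = simple_arr_alt array x
instance (array : List Int) (x : Int) (out : String) : Decidable (Spec_simple_arr array x out) := by
  unfold Spec_simple_arr; infer_instance

-- ===== CLAIM (what is proved, stated in full; the proofs are below) =====
def Claim_equal_simple_arr : Prop := ∀ (array : List Int) (x : Int), Dom_simple_arr array x → Pre_simple_arr array x → Spec_simple_arr array x (simple_arr array x)

-- ===== LEMMAS AND PROOFS =====

-- functional characterisation of A's inner loop: insert `key` after all elements ≤ it
def insF (key : Int) : List Int → List Int
  | [] => [key]
  | b :: t => if b ≤ key then b :: insF key t else key :: b :: t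

theorem insF_append_gt (key b : Int) (hb : ¬ b ≤ key) :
    ∀ L : List Int, insF key (L ++ [b]) = insF key L ++ [b] := by
  intro L
  induction L with
  | nil => simp [insF, hb]
  | cons a t ih => by_cases h : a ≤ key <;> simp [insF, h, ih]

theorem insF_all_le (key : Int) :
    ∀ L : List Int, (∀ a ∈ L, a ≤ key) → insF key L = L ++ [key] := by
  intro L h
  induction L with
  | nil => simp [insF]
  | cons a t ih =>
      simp only [List.mem_cons] at h
      simp [insF, h a (Or.inl rfl), ih (fun a ha => h a (Or.inr ha))]

theorem insF_perm (key : Int) (L : List Int) : (insF key L).Perm (key :: L) := by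
  induction L with
  | nil => simp [insF]
  | cons a t ih =>
      by_cases h : a ≤ key
      · simpa [insF, h] using ((ih.cons a).trans (List.Perm.swap key a t))
      · simp [insF, h]

theorem insF_pairwise (key : Int) (L : List Int) (h : L.Pairwise (· ≤ ·)) :
    (insF key L).Pairwise (· ≤ ·) := by
  induction L with
  | nil => simp [insF]
  | cons a t ih =>
      rcases List.pairwise_cons.1 h with ⟨ha, ht⟩
      by_cases hk : a ≤ key
      · rw [show insF key (a :: t) = a :: insF key t by simp [insF, hk]]
        refine List.pairwise_cons.2 ⟨?_, ih ht⟩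
        intro b hb
        rcases (insF_perm key t).mem_iff.1 hb with h1
        simp at h1
        rcases h1 with rfl | hbt
        · exact hk
        · exact ha b hbt
      · rw [show insF key (a :: t) = key :: a :: t by simp [insF, hk]]
        refine List.pairwise_cons.2 ⟨?_, h⟩
        intro b hb
        simp at hb
        rcases hb with rfl | hbt
        · omega
        · exact le_trans (by omega) (ha b hbt)

theorem pyGetD_prefix (L : List Int) (b : Int) (R : List Int) :
    PySem.List.pyGetD (L ++ b :: R) (L.length : Int) 0 = b := by
  simp [pysem]

theorem pySetD_prefix (L : List Int) (c : Int) (R : List Int) (v : Int) :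
    PySem.List.pySetD (L ++ c :: R) (L.length : Int) v = L ++ v :: R := by
  simp [PySem.List.pySetD, pysem]

theorem insInner_eq (key : Int) :
    ∀ (L : List Int) (c : Int) (R : List Int), L.Pairwise (· ≤ ·) →
      insInner (L ++ c :: R) key ((L.length : Int) - 1) = insF key L ++ R := by
  intro L
  induction L using List.reverseRecOn with
  | nil =>
      intro c R _
      rw [insInner]
      simp only [List.length_nil, Nat.cast_zero, zero_sub]
      rw [dif_neg (by omega)]
      have : ((-1 : Int) + 1) = ((0 : Nat) : Int) := by norm_num
      rw [this]
      simpa [insF] using pySetD_prefix [] c R key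
  | append_singleton L' b ih =>
      intro c R hsorted
      have hL' : L'.Pairwise (· ≤ ·) := (List.pairwise_append.1 hsorted).1
      have hle : ∀ a ∈ L', a ≤ b := by
        intro a ha
        exact (List.pairwise_append.1 hsorted).2.2 a ha b (by simp)
      have hjl : ((L' ++ [b]).length : Int) - 1 = (L'.length : Int) := by simp
      rw [insInner, hjl]
      have harr : L' ++ [b] ++ c :: R = L' ++ b :: c :: R := by simp
      by_cases hk : key < b
      · rw [dif_pos ?side]
        case side =>
          constructor
          · omega
          · rw [harr, pyGetD_prefix L' b (c :: R)]; exact hk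
        rw [harr, pyGetD_prefix L' b (c :: R)]
        have hset : PySem.List.pySetD (L' ++ b :: c :: R) ((L'.length : Int) + 1) b
            = L' ++ b :: b :: R := by
          have h1 : L' ++ b :: c :: R = (L' ++ [b]) ++ c :: R := by simp
          have h2 : ((L'.length : Int) + 1) = (((L' ++ [b]).length : Nat) : Int) := by simp
          rw [h1, h2, pySetD_prefix (L' ++ [b]) c R b]
          simp
        rw [hset]
        have := ih (b) (b :: R) hL'
        rw [show L' ++ b :: b :: R = L' ++ (b :: (b :: R)) by simp] at *
        rw [this]
        rw [insF_append_gt key b (by omega) L']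
        simp
      · rw [dif_neg ?side2]
        case side2 =>
          rw [harr, pyGetD_prefix L' b (c :: R)]
          omega
        rw [harr]
        have h1 : L' ++ b :: c :: R = (L' ++ [b]) ++ c :: R := by simp
        have h2 : ((L'.length : Int) + 1) = (((L' ++ [b]).length : Nat) : Int) := by simp
        rw [h1, h2, pySetD_prefix (L' ++ [b]) c R key]
        rw [insF_all_le key (L' ++ [b]) ?hall]
        case hall =>
          intro a ha
          rcases List.mem_append.1 ha with h | h
          · exact le_trans (hle a h) (by omega)
          · simp at h; omega
        simp

theorem insertion_sort_loop :
    ∀ (rest S : List Int), S.Pairwise (· ≤ ·) →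
      (PySem.List.pyRange (S.length : Int) ((S.length : Int) + (rest.length : Int)) 1).foldl
        (fun a i => insInner a (PySem.List.pyGetD a i 0) (i - 1)) (S ++ rest)
      = rest.foldl (fun s k => insF k s) S := by
  intro rest
  induction rest with
  | nil =>
      intro S _
      simp [pysem]
  | cons c rest' ih =>
      intro S hS
      rw [PySem.List.pyRange_one_cons (by simp)]
      rw [List.foldl_cons]
      rw [pyGetD_prefix S c rest']
      rw [insInner_eq c S c rest' hS]
      have hlen : ((insF c S).length : Int) = (S.length : Int) + 1 := by
        have := (insF_perm c S).length_eq
        simp [this]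
      have ih' := ih (insF c S) (insF_pairwise c S hS)
      rw [List.foldl_cons]
      rw [show ((S.length : Int) + 1) = ((insF c S).length : Int) from by omega,
          show ((S.length : Int) + ((c :: rest').length : Int)) = ((insF c S).length : Int) + (rest'.length : Int) from by simp; omega]
      exact ih'

theorem insertion_sort_cons (a : Int) (t : List Int) :
    insertion_sort (a :: t) = t.foldl (fun s k => insF k s) [a] := by
  unfold insertion_sort
  have h1 : PySem.List.len (a :: t) = ((([a] : List Int).length : Int) + (t.length : Int)) := by
    simp [pysem]; omega
  rw [h1, show (1 : Int) = ((([a] : List Int).length : Nat) : Int) by simp,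
      show (a :: t) = [a] ++ t by simp]
  exact insertion_sort_loop t [a] (by simp)

theorem foldl_insF_perm : ∀ (t S : List Int), (t.foldl (fun s k => insF k s) S).Perm (S ++ t) := by
  intro t
  induction t with
  | nil => simp
  | cons c t' ih =>
      intro S
      rw [List.foldl_cons]
      refine (ih (insF c S)).trans ?_
      have h1 : (insF c S).Perm (S ++ [c]) :=
        (insF_perm c S).trans (List.perm_append_comm (l₁ := [c]) (l₂ := S))
      simpa [List.append_assoc] using h1.append_right t'

theorem foldl_insF_pairwise : ∀ (t S : List Int), S.Pairwise (· ≤ ·) →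
    (t.foldl (fun s k => insF k s) S).Pairwise (· ≤ ·) := by
  intro t
  induction t with
  | nil => intro S h; simpa using h
  | cons c t' ih =>
      intro S h
      rw [List.foldl_cons]
      exact ih (insF c S) (insF_pairwise c S h)

-- B side
theorem pvMerge_eq_merge : ∀ (l r : List Int), pvMerge l r = List.merge l r (fun a b => a ≤ b)
  | [], r => by simp [pvMerge]
  | a :: l, [] => by simp [pvMerge]
  | a :: l, b :: r => by
      rw [pvMerge, List.merge]
      by_cases h : a ≤ b
      · simp [h, pvMerge_eq_merge l (b :: r)]
      · simp [h, pvMerge_eq_merge (a :: l) r]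
  termination_by l r => l.length + r.length

theorem pvMerge_perm (l r : List Int) : (pvMerge l r).Perm (l ++ r) := by
  rw [pvMerge_eq_merge]
  exact List.merge_perm_append _

theorem pvMerge_pairwise (l r : List Int) (hl : l.Pairwise (· ≤ ·)) (hr : r.Pairwise (· ≤ ·)) :
    (pvMerge l r).Pairwise (· ≤ ·) := by
  rw [pvMerge_eq_merge]
  have := List.pairwise_merge (le := fun a b : Int => decide (a ≤ b)) (by intro a b c; simp; omega)
    (by intro a b; simp; omega) l r (by simpa using hl) (by simpa using hr)
  simpa using this

theorem pvMsort_perm (a : List Int) : (pvMsort a).Perm a := by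
  induction a using pvMsort.induct with
  | case1 a h => rw [pvMsort, dif_pos h]
  | case2 a h mid ih1 ih2 =>
      rw [pvMsort, dif_neg h]
      exact ((pvMerge_perm _ _).trans ((ih1.append ih2))).trans (by rw [List.take_append_drop])

theorem pvMsort_pairwise (a : List Int) : (pvMsort a).Pairwise (· ≤ ·) := by
  induction a using pvMsort.induct with
  | case1 a h =>
      rw [pvMsort, dif_pos h]
      match a, h with
      | [], _ => simp
      | [x], _ => simp
  | case2 a h mid ih1 ih2 =>
      rw [pvMsort, dif_neg h]
      exact pvMerge_pairwise _ _ ih1 ih2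

-- the two sorts agree: a sorted permutation of `array` is unique over Int
theorem sorts_agree (array : List Int) (h : array ≠ []) :
    insertion_sort array = pvMsort array := by
  match array, h with
  | a :: t, _ =>
      rw [insertion_sort_cons a t]
      have hperm : (t.foldl (fun s k => insF k s) [a]).Perm (pvMsort (a :: t)) :=
        ((foldl_insF_perm t [a]).trans (by simp)).trans (pvMsort_perm (a :: t)).symm
      exact List.Perm.eq_of_pairwise (fun p q _ _ h1 h2 => by omega)
        (foldl_insF_pairwise t [a] (by simp)) (pvMsort_pairwise (a :: t)) hperm

theorem foldl_sum_count (x : Int) : ∀ (l : List Int) (s c : Int),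
    l.foldl (fun (p : Int × Int) i => (p.1 + i, if i = x then p.2 + 1 else p.2)) (s, c)
     = (s + l.sum, c + (l.count x : Int)) := by
  intro l
  induction l with
  | nil => simp
  | cons a t ih =>
      intro s c
      rw [List.foldl_cons, ih]
      by_cases h : a = x
      · subst h
        rw [Prod.ext_iff]
        simp
        constructor
        · ring
        · ring
      · rw [Prod.ext_iff]
        simp [h]
        ring

theorem ports_agree (array : List Int) (x : Int) (h : array ≠ []) :
    simple_arr array x = simple_arr_alt array x := by
  have hs := sorts_agree array h
  simp only [simple_arr, simple_arr_alt, hs, foldl_sum_count x, PySem.List.count_eq, zero_add]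

-- ===== VERDICT (by name: the statement is the Claim_ definition above) =====
theorem simple_arr_spec : Claim_equal_simple_arr := by
  intro array x _ hpre
  exact ports_agree array x hpre
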